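-- pv_equiv track=rewrite | github.com/MrTejpalSingh/Data_Structures | Small Practise Programs/Fundamentals Python/Module2/Practice Problems/level 1/pp_6.py | list123
-- ===== SOURCE A (Python) =====
-- def list123(nums):
--     flg = 0
--     for i in range(len(nums)-1):
--         if nums[i] == 1:
--             for j in range(i + 1, len(nums)):
--                 if nums[j] == 2:
--                     for k in range(j + 1, len(nums)):
--                         if nums[k] == 3:
--                             flg = 1
--     if flg == 0:
--         return False
--     else:
--         return True
-- ===== SOURCE B (Python) =====
-- def list123(nums):
--     stage = 0
--     for x in nums:
--         if stage == 0 and x == 1: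
--             stage = 1
--         elif stage == 1 and x == 2:
--             stage = 2
--         elif stage == 2 and x == 3:
--             stage = 3
--     return stage == 3
-- ===== Notes on version B (the rewrite author's own statement) =====
-- stated objective: simpler
-- what changed: Replaced the triple nested index scan with a single left-to-right pass over the elements that advances a 3-state machine (seen 1, then 2, then 3).
import Mathlib
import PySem

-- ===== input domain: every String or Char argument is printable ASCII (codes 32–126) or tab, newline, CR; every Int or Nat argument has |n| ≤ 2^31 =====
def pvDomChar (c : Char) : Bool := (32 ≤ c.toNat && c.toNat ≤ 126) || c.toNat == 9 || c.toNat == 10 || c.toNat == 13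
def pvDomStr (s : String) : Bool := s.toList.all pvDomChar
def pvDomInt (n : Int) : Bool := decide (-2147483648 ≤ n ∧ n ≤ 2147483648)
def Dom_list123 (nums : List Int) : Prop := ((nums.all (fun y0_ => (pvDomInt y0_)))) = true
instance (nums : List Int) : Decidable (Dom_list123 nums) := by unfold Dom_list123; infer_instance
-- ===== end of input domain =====

-- B replaces A's triple nested index scan by a single left-to-right pass driving a 3-state machine (simpler one-pass formulation).


-- ===== PORT A =====
-- literal port: flg starts 0, three nested index loops set it to 1 on a 1..2..3 hit
def list123 (nums : List Int) : Bool :=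
  let n : Int := (nums.length : Int)
  let flg : Int :=
    (PySem.List.pyRange 0 (n - 1) 1).foldl (fun flg i =>
      if PySem.List.pyGetD nums i 0 = 1 then
        (PySem.List.pyRange (i + 1) n 1).foldl (fun flg j =>
          if PySem.List.pyGetD nums j 0 = 2 then
            (PySem.List.pyRange (j + 1) n 1).foldl (fun flg k =>
              if PySem.List.pyGetD nums k 0 = 3 then 1 else flg) flg
          else flg) flg
      else flg) 0
  if flg = 0 then false else true

-- ===== PORT B =====
-- literal port of Source B: one fold advancing the stage 0→1→2→3 on seeing 1, 2, 3 in order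
def list123_alt (nums : List Int) : Bool :=
  let stage : Int := nums.foldl (fun stage x =>
    if stage = 0 ∧ x = 1 then 1
    else if stage = 1 ∧ x = 2 then 2
    else if stage = 2 ∧ x = 3 then 3
    else stage) 0
  decide (stage = 3)

-- ===== PRECONDITION & SPEC =====
def Spec_list123 (nums : List Int) (out : Bool) : Prop := out = list123_alt nums
instance (nums : List Int) (out : Bool) : Decidable (Spec_list123 nums out) := by unfold Spec_list123; infer_instance

-- ===== CLAIM (what is proved, stated in full; the proofs are below) =====
def Claim_equal_list123 : Prop := ∀ (nums : List Int), Dom_list123 nums → Spec_list123 nums (list123 nums)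

-- ===== LEMMAS AND PROOFS =====

-- "set flg to 1 on a hit" loop shape shared by all three of A's loops
theorem foldl_ite_one {α : Type} (p : α → Prop) [DecidablePred p] (l : List α) (a : Int) :
    l.foldl (fun acc x => if p x then (1 : Int) else acc) a = if ∃ x ∈ l, p x then 1 else a := by
  induction l generalizing a with
  | nil => simp
  | cons x t ih =>
    by_cases h : p x
    · simp [h, ih]
    · simp [h, ih]

theorem if_if_one {c d : Prop} [Decidable c] [Decidable d] (a : Int) :
    (if c then (if d then (1 : Int) else a) else a) = if c ∧ d then 1 else a := by
  split_ifs <;> tauto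

-- the "2 then 3" and "1 then 2 then 3" subsequence predicates both programs decide
def H23 : List Int → Prop
  | [] => False
  | x :: t => (x = 2 ∧ 3 ∈ t) ∨ H23 t

def H123 : List Int → Prop
  | [] => False
  | x :: t => (x = 1 ∧ H23 t) ∨ H123 t

theorem H23_mem3 : ∀ (l : List Int), H23 l → 3 ∈ l
  | _ :: t, Or.inl ⟨_, h3⟩ => List.mem_cons_of_mem _ h3
  | _ :: t, Or.inr h => List.mem_cons_of_mem _ (H23_mem3 t h)

theorem H123_H23 : ∀ (l : List Int), H123 l → H23 l
  | _ :: t, Or.inl ⟨_, h⟩ => Or.inr h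
  | _ :: t, Or.inr h => Or.inr (H123_H23 t h)

theorem h23_iff (l : List Int) :
    H23 l ↔ ∃ j k : Nat, j < k ∧ l[j]? = some 2 ∧ l[k]? = some 3 := by
  induction l with
  | nil => simp [H23]
  | cons x t ih =>
    constructor
    · rintro (⟨rfl, h3⟩ | h)
      · obtain ⟨k, hk⟩ := List.mem_iff_getElem?.mp h3
        exact ⟨0, k + 1, by omega, by simp, by simpa using hk⟩
      · obtain ⟨j, k, hjk, h2, h3⟩ := ih.mp h
        exact ⟨j + 1, k + 1, by omega, by simpa using h2, by simpa using h3⟩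
    · rintro ⟨j, k, hjk, h2, h3⟩
      cases j with
      | zero =>
        obtain ⟨k', rfl⟩ : ∃ k', k = k' + 1 := ⟨k - 1, by omega⟩
        left
        refine ⟨by simpa using h2, List.mem_iff_getElem?.mpr ⟨k', by simpa using h3⟩⟩
      | succ j' =>
        obtain ⟨k', rfl⟩ : ∃ k', k = k' + 1 := ⟨k - 1, by omega⟩
        exact Or.inr (ih.mpr ⟨j', k', by omega, by simpa using h2, by simpa using h3⟩)

theorem h123_iff (l : List Int) :
    H123 l ↔ ∃ i j k : Nat, i < j ∧ j < k ∧ l[i]? = some 1 ∧ l[j]? = some 2 ∧ l[k]? = some 3 := by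
  induction l with
  | nil => simp [H123]
  | cons x t ih =>
    constructor
    · rintro (⟨rfl, h⟩ | h)
      · obtain ⟨j, k, hjk, h2, h3⟩ := (h23_iff t).mp h
        exact ⟨0, j + 1, k + 1, by omega, by omega, by simp, by simpa using h2, by simpa using h3⟩
      · obtain ⟨i, j, k, hij, hjk, h1, h2, h3⟩ := ih.mp h
        exact ⟨i + 1, j + 1, k + 1, by omega, by omega, by simpa using h1,
          by simpa using h2, by simpa using h3⟩
    · rintro ⟨i, j, k, hij, hjk, h1, h2, h3⟩
      cases i with
      | zero =>
        obtain ⟨j', rfl⟩ : ∃ j', j = j' + 1 := ⟨j - 1, by omega⟩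
        obtain ⟨k', rfl⟩ : ∃ k', k = k' + 1 := ⟨k - 1, by omega⟩
        exact Or.inl ⟨by simpa using h1,
          (h23_iff t).mpr ⟨j', k', by omega, by simpa using h2, by simpa using h3⟩⟩
      | succ i' =>
        obtain ⟨j', rfl⟩ : ∃ j', j = j' + 1 := ⟨j - 1, by omega⟩
        obtain ⟨k', rfl⟩ : ∃ k', k = k' + 1 := ⟨k - 1, by omega⟩
        exact Or.inr (ih.mpr ⟨i', j', k', by omega, by omega, by simpa using h1,
          by simpa using h2, by simpa using h3⟩)

-- B's state-machine step (definitionally the lambda in list123_alt)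
def stepB : Int → Int → Int := fun stage x =>
  if stage = 0 ∧ x = 1 then 1
  else if stage = 1 ∧ x = 2 then 2
  else if stage = 2 ∧ x = 3 then 3
  else stage

theorem foldl_step3 (l : List Int) : l.foldl stepB 3 = 3 := by
  induction l with
  | nil => rfl
  | cons x t ih => simpa [stepB] using ih

theorem foldl_step2 (l : List Int) : l.foldl stepB 2 = 3 ↔ 3 ∈ l := by
  induction l with
  | nil => simp
  | cons x t ih =>
    by_cases h : x = 3
    · subst h; simp [stepB, foldl_step3]
    · simp only [List.foldl_cons, List.mem_cons]
      rw [show stepB 2 x = 2 by simp [stepB, h]]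
      rw [ih]
      constructor
      · exact Or.inr
      · rintro (rfl | h3)
        · exact absurd rfl h
        · exact h3

theorem foldl_step1 (l : List Int) : l.foldl stepB 1 = 3 ↔ H23 l := by
  induction l with
  | nil => simp [H23]
  | cons x t ih =>
    by_cases h : x = 2
    · subst h
      simp only [List.foldl_cons, H23]
      rw [show stepB 1 2 = 2 by simp [stepB]]
      rw [foldl_step2]
      constructor
      · exact fun h3 => Or.inl ⟨by simp, h3⟩
      · rintro (⟨_, h3⟩ | ht)
        · exact h3
        · exact H23_mem3 t ht
    · simp only [List.foldl_cons, H23]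
      rw [show stepB 1 x = 1 by simp [stepB, h]]
      rw [ih]
      constructor
      · exact Or.inr
      · rintro (⟨h2, _⟩ | ht)
        · exact absurd h2 h
        · exact ht

theorem foldl_step0 (l : List Int) : l.foldl stepB 0 = 3 ↔ H123 l := by
  induction l with
  | nil => simp [H123]
  | cons x t ih =>
    by_cases h : x = 1
    · subst h
      simp only [List.foldl_cons, H123]
      rw [show stepB 0 1 = 1 by simp [stepB]]
      rw [foldl_step1]
      constructor
      · exact fun h23 => Or.inl ⟨by simp, h23⟩
      · rintro (⟨_, h23⟩ | ht)
        · exact h23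
        · exact H123_H23 t ht
    · simp only [List.foldl_cons, H123]
      rw [show stepB 0 x = 0 by simp [stepB, h]]
      rw [ih]
      constructor
      · exact Or.inr
      · rintro (⟨h1, _⟩ | ht)
        · exact absurd h1 h
        · exact ht

-- A's value is exactly the indexed 1-then-2-then-3 existential
theorem listA_char (nums : List Int) :
    list123 nums = true ↔
      ∃ i j k : Nat, i < j ∧ j < k ∧ nums[i]? = some 1 ∧ nums[j]? = some 2 ∧ nums[k]? = some 3 := by
  unfold list123
  simp only [foldl_ite_one (fun k => PySem.List.pyGetD nums k 0 = 3)]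
  simp only [if_if_one]
  simp only [foldl_ite_one (fun j => PySem.List.pyGetD nums j 0 = 2 ∧ _)]
  simp only [if_if_one]
  simp only [foldl_ite_one (fun i => PySem.List.pyGetD nums i 0 = 1 ∧ _)]
  have key : (∃ i ∈ PySem.List.pyRange 0 ((nums.length : Int) - 1) 1,
      PySem.List.pyGetD nums i 0 = 1 ∧
        ∃ j ∈ PySem.List.pyRange (i + 1) (nums.length : Int) 1,
          PySem.List.pyGetD nums j 0 = 2 ∧
            ∃ k ∈ PySem.List.pyRange (j + 1) (nums.length : Int) 1,
              PySem.List.pyGetD nums k 0 = 3) ↔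
      ∃ i j k : Nat, i < j ∧ j < k ∧ nums[i]? = some 1 ∧ nums[j]? = some 2 ∧ nums[k]? = some 3 := by
    constructor
    · rintro ⟨i, hi, h1, j, hj, h2, k, hk, h3⟩
      rw [PySem.List.mem_pyRange_one] at hi hj hk
      refine ⟨i.toNat, j.toNat, k.toNat, by omega, by omega, ?_, ?_, ?_⟩
      · rw [List.getElem?_eq_getElem (by omega)]
        rw [PySem.List.pyGetD_eq_getElem nums 0 (by omega) (by omega)] at h1
        simpa using h1
      · rw [List.getElem?_eq_getElem (by omega)]
        rw [PySem.List.pyGetD_eq_getElem nums 0 (by omega) (by omega)] at h2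
        simpa using h2
      · rw [List.getElem?_eq_getElem (by omega)]
        rw [PySem.List.pyGetD_eq_getElem nums 0 (by omega) (by omega)] at h3
        simpa using h3
    · rintro ⟨i, j, k, hij, hjk, h1, h2, h3⟩
      have hk : k < nums.length := by
        by_contra hc
        simp [List.getElem?_eq_none (show nums.length ≤ k by omega)] at h3
      rw [List.getElem?_eq_getElem (by omega)] at h1 h2 h3
      refine ⟨(i : Int), ?_, ?_, (j : Int), ?_, ?_, (k : Int), ?_, ?_⟩
      · rw [PySem.List.mem_pyRange_one]; omega
      · rw [PySem.List.pyGetD_eq_getElem nums 0 (by omega) (by omega)]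
        simpa using h1
      · rw [PySem.List.mem_pyRange_one]; omega
      · rw [PySem.List.pyGetD_eq_getElem nums 0 (by omega) (by omega)]
        simpa using h2
      · rw [PySem.List.mem_pyRange_one]; omega
      · rw [PySem.List.pyGetD_eq_getElem nums 0 (by omega) (by omega)]
        simpa using h3
  by_cases hC : (∃ i ∈ PySem.List.pyRange 0 ((nums.length : Int) - 1) 1,
      PySem.List.pyGetD nums i 0 = 1 ∧
        ∃ j ∈ PySem.List.pyRange (i + 1) (nums.length : Int) 1,
          PySem.List.pyGetD nums j 0 = 2 ∧
            ∃ k ∈ PySem.List.pyRange (j + 1) (nums.length : Int) 1,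
              PySem.List.pyGetD nums k 0 = 3)
  · simp only [if_pos hC]
    norm_num
    obtain ⟨i, j, k, h⟩ := key.mp hC
    exact ⟨i, j, h.1, k, h.2.1, h.2.2.1, h.2.2.2.1, h.2.2.2.2⟩
  · simp only [if_neg hC]
    norm_num
    intro i j hij k hjk h1 h2 h3
    exact (mt key.mpr hC) ⟨i, j, k, hij, hjk, h1, h2, h3⟩

-- ===== VERDICT (by name: the statement is the Claim_ definition above) =====
theorem list123_spec : Claim_equal_list123 := by
  intro nums _
  unfold Spec_list123 list123_alt
  show list123 nums = decide (nums.foldl stepB 0 = 3)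
  have hB : (nums.foldl stepB 0 = 3) ↔ H123 nums := foldl_step0 nums
  rw [h123_iff] at hB
  by_cases h : ∃ i j k : Nat, i < j ∧ j < k ∧
      nums[i]? = some 1 ∧ nums[j]? = some 2 ∧ nums[k]? = some 3
  · exact ((listA_char nums).mpr h).trans (decide_eq_true (hB.mpr h)).symm
  · exact (Bool.eq_false_iff.mpr (fun ht => h ((listA_char nums).mp ht))).trans
      (decide_eq_false (fun hp => h (hB.mp hp))).symm
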